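-- pv_equiv track=rewrite | github.com/Tovermodus/Tic-Tac-Qu-Learning | conversions.py | learningActionToGameAction
-- ===== SOURCE A (Python) =====
-- def learningActionToGameAction(learningAction):
--     actions=[0]*45
--     counter=0
--     for l in range(9):
--             for j in range(l):
--                 actions[counter]=([j,l],2)
--                 counter+=1
--     for l in range(9):
--         actions[counter]=([l],1)
--         counter+=1
--     return actions[learningAction]
-- ===== SOURCE B (Python) =====
-- def learningActionToGameAction(learningAction):
--     n = learningAction % 45
--     if n >= 36:
--         return ([n - 36], 1)
--     l = 1
--     while n >= l * (l + 1) // 2: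
--         l += 1
--     return ([n - l * (l - 1) // 2, l], 2)
-- ===== Notes on version B (the rewrite author's own statement) =====
-- stated objective: simpler
-- what changed: Replaces building and indexing a 45-element table with direct arithmetic on the index taken cyclically mod 45: subtraction for single-cell actions, otherwise triangular-number inversion by a short scan; Pre_ excludes only the indices (outside -45..44) on which A raises IndexError.
-- outside the precondition, e.g. on learningActionToGameAction(45): A raises IndexError, B returns ([0, 1], 2)
import Mathlib
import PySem

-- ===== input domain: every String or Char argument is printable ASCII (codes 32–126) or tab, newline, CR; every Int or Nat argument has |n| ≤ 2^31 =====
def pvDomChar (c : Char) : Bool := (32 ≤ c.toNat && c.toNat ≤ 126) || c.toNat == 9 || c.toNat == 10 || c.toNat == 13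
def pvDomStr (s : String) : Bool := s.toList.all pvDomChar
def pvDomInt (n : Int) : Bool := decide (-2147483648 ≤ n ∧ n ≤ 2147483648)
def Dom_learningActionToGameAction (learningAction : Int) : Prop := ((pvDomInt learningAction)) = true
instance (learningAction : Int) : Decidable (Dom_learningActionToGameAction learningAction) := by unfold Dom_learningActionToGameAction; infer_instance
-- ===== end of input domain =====

-- B replaces A's 45-element table build + index with direct arithmetic on the
-- index taken cyclically mod 45 (simpler); Pre_ excludes only indices where A raises.


-- ===== PORT A =====
-- Python's actions=[0]*45 holds ints that are all overwritten before being read on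
-- any in-range index; the initial filler is a dummy of the output type here.
def learningActionToGameAction (learningAction : Int) : List Int × Int :=
  let actions : List (List Int × Int) := List.replicate 45 ([], 0)
  let st1 := (PySem.List.pyRange 0 9 1).foldl
    (fun (st : List (List Int × Int) × Int) l =>
      (PySem.List.pyRange 0 l 1).foldl
        (fun st j => (st.1.set st.2.toNat ([j, l], 2), st.2 + 1)) st)
    (actions, 0)
  let st2 := (PySem.List.pyRange 0 9 1).foldl
    (fun (st : List (List Int × Int) × Int) l =>
      (st.1.set st.2.toNat ([l], 1), st.2 + 1)) st1
  -- actions[learningAction]: IndexError (none) excluded by Pre_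
  (PySem.List.pyGet? st2.1 learningAction).getD ([], 0)

-- ===== PORT B =====
-- the while loop of Source B; fuel 45 only makes the recursion total (never exhausted for 0 ≤ n ≤ 35)
def pvFindL (n : Int) (l : Int) (fuel : Nat) : Int :=
  match fuel with
  | 0 => l
  | fuel + 1 =>
    if PySem.Int.floordiv (l * (l + 1)) 2 ≤ n then pvFindL n (l + 1) fuel else l

def learningActionToGameAction_alt (learningAction : Int) : List Int × Int :=
  let n := PySem.Int.mod learningAction 45
  if n ≥ 36 then ([n - 36], 1)
  else
    let l := pvFindL n 1 45
    ([n - PySem.Int.floordiv (l * (l - 1)) 2, l], 2)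

-- ===== PRECONDITION & SPEC =====
-- Pre_ excludes exactly the indices on which Python A raises IndexError.
def Pre_learningActionToGameAction (learningAction : Int) : Prop :=
  -45 ≤ learningAction ∧ learningAction ≤ 44
instance (learningAction : Int) : Decidable (Pre_learningActionToGameAction learningAction) := by
  unfold Pre_learningActionToGameAction; infer_instance
def pvWitness_learningActionToGameAction : Int := (7)
def Spec_learningActionToGameAction (learningAction : Int) (out : List Int × Int) : Prop := out = learningActionToGameAction_alt learningAction
instance (learningAction : Int) (out : List Int × Int) : Decidable (Spec_learningActionToGameAction learningAction out) := by unfold Spec_learningActionToGameAction; infer_instance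


-- ===== CLAIM (what is proved, stated in full; the proofs are below) =====
def Claim_equal_learningActionToGameAction : Prop := ∀ (learningAction : Int), Dom_learningActionToGameAction learningAction → Pre_learningActionToGameAction learningAction → Spec_learningActionToGameAction learningAction (learningActionToGameAction learningAction)

-- ===== LEMMAS AND PROOFS =====

-- ===== VERDICT (by name: the statement is the Claim_ definition above) =====
set_option maxHeartbeats 2000000 in
theorem learningActionToGameAction_spec : Claim_equal_learningActionToGameAction := by
  intro n _ hpre
  obtain ⟨h1, h2⟩ := hpre
  unfold Spec_learningActionToGameAction
  interval_cases n <;> decide
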